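-- pv_equiv track=rewrite | github.com/ImJiyun/Algorithm | 프로그래머스/2/169199. 리코쳇 로봇/리코쳇 로봇.py | solution
-- ===== SOURCE A (Python) =====
-- from collections import deque
--
-- def solution(board):
--     R = len(board)
--     C = len(board[0])
--     dir = [(-1, 0), (0, -1), (1, 0), (0, 1)]
--
--     visited = [[False] * C for _ in range(R)]
--     strR, strC = 0, 0
--     endR, endC = 0, 0
--
--     for r in range(R):
--         for c in range(C):
--             if board[r][c] == 'R':
--                 strR, strC = r, c
--             if board[r][c] == 'G':
--                 endR, endC = r, c
--
--     q = deque([(strR, strC, 0)])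
--     visited[strR][strC] = True
--
--     while q:
--         r, c, mov = q.popleft()
--
--         if r == endR and c == endC:
--             return mov
--
--         for dr, dc in dir:
--             i = 1
--             tr, tc = r, c
--             while True:
--                 tr = r + dr * i
--                 tc = c + dc * i
--                 if tr < 0 or tr >= R or tc < 0 or tc >= C or board[tr][tc] == 'D':
--                     tr, tc = r + dr * (i-1), c + dc * (i-1)
--                     break
--                 i += 1
--             nr, nc = tr, tc
--             if not visited[nr][nc]:
--                 visited[nr][nc] = True
--                 q.append((nr, nc, mov + 1))
--
--     return -1
-- ===== SOURCE B (Python) =====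
-- from collections import deque
--
-- def _sweep_fwd(blocked):
--     # res[j] = landing index when sliding toward index 0 from j (nearest blocker below +1)
--     res = []
--     stop = 0
--     for j in range(len(blocked)):
--         res.append(stop)
--         if blocked[j]:
--             stop = j + 1
--     return res
--
-- def _sweep_bwd(blocked):
--     # res[j] = landing index when sliding toward index n-1 from j
--     n = len(blocked)
--     res = []
--     stop = n - 1
--     for j in range(n - 1, -1, -1):
--         res.append(stop)
--         if blocked[j]:
--             stop = j - 1
--     return res[::-1]
--
-- def solution(board):
--     R = len(board)
--     C = len(board[0])
--
--     strR, strC = 0, 0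
--     endR, endC = 0, 0
--     for r in range(R):
--         for c in range(C):
--             if board[r][c] == 'R':
--                 strR, strC = r, c
--             if board[r][c] == 'G':
--                 endR, endC = r, c
--
--     # precomputed landing cell per direction for every cell
--     cols = [[board[r][c] == 'D' for r in range(R)] for c in range(C)]
--     rows = [[board[r][c] == 'D' for c in range(C)] for r in range(R)]
--     upT = [_sweep_fwd(col) for col in cols]      # upT[c][r]
--     downT = [_sweep_bwd(col) for col in cols]    # downT[c][r]
--     leftT = [_sweep_fwd(row) for row in rows]    # leftT[r][c]
--     rightT = [_sweep_bwd(row) for row in rows]   # rightT[r][c]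
--
--     visited = [[False] * C for _ in range(R)]
--     q = deque([(strR, strC, 0)])
--     visited[strR][strC] = True
--
--     while q:
--         r, c, mov = q.popleft()
--         if r == endR and c == endC:
--             return mov
--         for nr, nc in ((upT[c][r], c), (r, leftT[r][c]), (downT[c][r], c), (r, rightT[r][c])):
--             if not visited[nr][nc]:
--                 visited[nr][nc] = True
--                 q.append((nr, nc, mov + 1))
--     return -1
-- ===== Notes on version B (the rewrite author's own statement) =====
-- stated objective: alternative
-- what changed: Instead of re-scanning the ray of up to R+C cells for every BFS transition, B precomputes the slide-landing cell of every cell for all four directions by directional sweeps and the BFS then transitions by table lookup.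
import Mathlib
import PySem

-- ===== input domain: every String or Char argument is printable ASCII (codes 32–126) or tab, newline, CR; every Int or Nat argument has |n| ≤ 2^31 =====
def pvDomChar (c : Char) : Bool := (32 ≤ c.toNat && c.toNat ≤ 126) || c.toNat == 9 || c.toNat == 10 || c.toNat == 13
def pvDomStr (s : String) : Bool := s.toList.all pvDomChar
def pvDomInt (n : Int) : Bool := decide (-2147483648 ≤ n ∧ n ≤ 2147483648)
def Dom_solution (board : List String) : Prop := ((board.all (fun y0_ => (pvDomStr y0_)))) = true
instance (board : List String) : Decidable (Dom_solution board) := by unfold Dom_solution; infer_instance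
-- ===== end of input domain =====

-- B replaces A's per-move ray-scanning slide by four landing tables precomputed
-- with directional sweeps, so each BFS transition is a plain table lookup.

-- ===== PORT A =====
-- board[r][c] (both Pythons read cells only at in-range nonnegative indices)
def pvCell (board : List String) (r c : Int) : Char :=
  PySem.List.pyGetD (PySem.List.pyGetD board r "").toList c '?'

-- visited[r][c] read / write (identical code in both Pythons)
def pvGetV (v : List (List Bool)) (r c : Int) : Bool :=
  PySem.List.pyGetD (PySem.List.pyGetD v r []) c false

def pvSetV (v : List (List Bool)) (r c : Int) : List (List Bool) :=
  PySem.List.pySetD v r (PySem.List.pySetD (PySem.List.pyGetD v r []) c true)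

-- the R/G scan (identical nested loops in both Pythons); state = (strR, strC, endR, endC)
def scanRG (board : List String) (R C : Int) : Int × Int × Int × Int :=
  (PySem.List.pyRange 0 R 1).foldl (fun s r =>
    (PySem.List.pyRange 0 C 1).foldl (fun (s : Int × Int × Int × Int) c =>
      let s1 : Int × Int × Int × Int :=
        if pvCell board r c = 'R' then (r, c, s.2.2.1, s.2.2.2) else s
      if pvCell board r c = 'G' then (s1.1, s1.2.1, r, c) else s1) s) (0, 0, 0, 0)

-- the 'if not visited: mark and append' body (identical in both Pythons)
def pvUpd (mov : Int) (s : List (List Bool) × List (Int × Int × Int)) (nrc : Int × Int) :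
    List (List Bool) × List (Int × Int × Int) :=
  if pvGetV s.1 nrc.1 nrc.2 = true then s
  else (pvSetV s.1 nrc.1 nrc.2, s.2 ++ [(nrc.1, nrc.2, mov + 1)])

-- A's inner 'while True' slide loop, fuel-bounded
def slideLoopA (board : List String) (R C r c dr dc : Int) : Int → Nat → Int × Int
  | _, 0 => (r, c)
  | i, fuel + 1 =>
    let tr := r + dr * i
    let tc := c + dc * i
    if tr < 0 ∨ R ≤ tr ∨ tc < 0 ∨ C ≤ tc ∨ pvCell board tr tc = 'D' then
      (r + dr * (i - 1), c + dc * (i - 1))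
    else slideLoopA board R C r c dr dc (i + 1) fuel

-- A's BFS loop, fuel-bounded (each iteration pops one entry; ≤ R*C entries ever enqueued)
def bfsA (board : List String) (R C endR endC : Int) :
    Nat → List (Int × Int × Int) → List (List Bool) → Int
  | 0, _, _ => -1
  | _ + 1, [], _ => -1
  | fuel + 1, (r, c, mov) :: q, visited =>
    if r = endR ∧ c = endC then mov
    else
      let st := [((-1 : Int), (0 : Int)), (0, -1), (1, 0), (0, 1)].foldl
        (fun s d => pvUpd mov s (slideLoopA board R C r c d.1 d.2 1 ((R + C).toNat + 2)))
        (visited, q)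
      bfsA board R C endR endC fuel st.2 st.1

def solution (board : List String) : Int :=
  let R : Int := board.length
  let C : Int := ((PySem.List.pyGetD board 0 "").toList.length : Int)
  let g := scanRG board R C
  let visited := pvSetV (List.replicate R.toNat (List.replicate C.toNat false)) g.1 g.2.1
  bfsA board R C g.2.2.1 g.2.2.2 (R.toNat * C.toNat + 1) [(g.1, g.2.1, 0)] visited

-- ===== PORT B =====
-- _sweep_fwd(blocked): res[j] = landing index sliding toward 0 from j
def sweepFwd (bl : List Bool) : List Int :=
  ((PySem.List.pyRange 0 (bl.length : Int) 1).foldl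
    (fun (s : List Int × Int) j =>
      (s.1 ++ [s.2], if PySem.List.pyGetD bl j false = true then j + 1 else s.2))
    ([], 0)).1

-- _sweep_bwd(blocked): res[j] = landing index sliding toward n-1 from j
def sweepBwd (bl : List Bool) : List Int :=
  (((PySem.List.pyRange ((bl.length : Int) - 1) (-1) (-1)).foldl
    (fun (s : List Int × Int) j =>
      (s.1 ++ [s.2], if PySem.List.pyGetD bl j false = true then j - 1 else s.2))
    ([], (bl.length : Int) - 1)).1).reverse

-- cols[c][r] / rows[r][c] = (board[r][c] == 'D')
def colsB (board : List String) (R C : Int) : List (List Bool) :=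
  (PySem.List.pyRange 0 C 1).map (fun c =>
    (PySem.List.pyRange 0 R 1).map (fun r => decide (pvCell board r c = 'D')))

def rowsB (board : List String) (R C : Int) : List (List Bool) :=
  (PySem.List.pyRange 0 R 1).map (fun r =>
    (PySem.List.pyRange 0 C 1).map (fun c => decide (pvCell board r c = 'D')))

-- t[i][j]
def pvLook (t : List (List Int)) (i j : Int) : Int :=
  PySem.List.pyGetD (PySem.List.pyGetD t i []) j 0

-- B's BFS loop: O(1) table-lookup transitions
def bfsB (upT downT leftT rightT : List (List Int)) (endR endC : Int) :
    Nat → List (Int × Int × Int) → List (List Bool) → Int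
  | 0, _, _ => -1
  | _ + 1, [], _ => -1
  | fuel + 1, (r, c, mov) :: q, visited =>
    if r = endR ∧ c = endC then mov
    else
      let st := [(pvLook upT c r, c), (r, pvLook leftT r c),
                 (pvLook downT c r, c), (r, pvLook rightT r c)].foldl
        (pvUpd mov) (visited, q)
      bfsB upT downT leftT rightT endR endC fuel st.2 st.1

def solution_alt (board : List String) : Int :=
  let R : Int := board.length
  let C : Int := ((PySem.List.pyGetD board 0 "").toList.length : Int)
  let g := scanRG board R C
  let cols := colsB board R C
  let rows := rowsB board R C
  let upT := cols.map sweepFwd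
  let downT := cols.map sweepBwd
  let leftT := rows.map sweepFwd
  let rightT := rows.map sweepBwd
  let visited := pvSetV (List.replicate R.toNat (List.replicate C.toNat false)) g.1 g.2.1
  bfsB upT downT leftT rightT g.2.2.1 g.2.2.2 (R.toNat * C.toNat + 1) [(g.1, g.2.1, 0)] visited

-- ===== PRECONDITION & SPEC =====
-- Pre_: exactly where Python A returns normally — a nonempty board whose first row is
-- nonempty and no row shorter than the first (otherwise A raises IndexError).
def Pre_solution (board : List String) : Prop :=
  board ≠ [] ∧ 0 < (board.headD "").toList.length ∧
    ∀ s ∈ board, (board.headD "").toList.length ≤ s.toList.length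
instance (board : List String) : Decidable (Pre_solution board) := by
  unfold Pre_solution; infer_instance

def pvWitness_solution : List String := ["R.D", "..G"]

def Spec_solution (board : List String) (out : Int) : Prop := out = solution_alt board
instance (board : List String) (out : Int) : Decidable (Spec_solution board out) := by
  unfold Spec_solution; infer_instance

-- ===== CLAIM (what is proved, stated in full; the proofs are below) =====
def Claim_equal_solution : Prop :=
  ∀ (board : List String), Dom_solution board → Pre_solution board →
    Spec_solution board (solution board)

-- ===== LEMMAS AND PROOFS =====

-- landing index sliding toward 0 from p, over blocked predicate blk
def decLand (blk : Nat → Bool) : Nat → Int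
  | 0 => 0
  | p + 1 => if blk p then (p : Int) + 1 else decLand blk p

-- landing index sliding toward n-1, measured by gap g = (n-1) - position
def incLand (blk : Nat → Bool) (n : Nat) : Nat → Int
  | 0 => (n : Int) - 1
  | g + 1 => if blk (n - 1 - g) then (n : Int) - 2 - g else incLand blk n g


theorem decLand_bounds (blk : Nat → Bool) (p : Nat) :
    0 ≤ decLand blk p ∧ decLand blk p ≤ (p : Int) := by
  induction p with
  | zero => simp [decLand]
  | succ p ih => simp only [decLand]; split <;> push_cast <;> omega

theorem incLand_bounds (blk : Nat → Bool) (n g : Nat) (hg : g ≤ n - 1) (hn : 0 < n) :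
    0 ≤ incLand blk n g ∧ incLand blk n g ≤ (n : Int) - 1 := by
  induction g with
  | zero => simp [incLand]; omega
  | succ g ih =>
    simp only [incLand]; split
    · push_cast; omega
    · have := ih (by omega); omega

theorem decLand_congr (blk blk' : Nat → Bool) (p : Nat)
    (h : ∀ k, k < p → blk k = blk' k) : decLand blk p = decLand blk' p := by
  induction p with
  | zero => rfl
  | succ p ih =>
    simp only [decLand, h p (by omega)]
    rw [ih (fun k hk => h k (by omega))]

theorem incLand_congr (blk blk' : Nat → Bool) (n : Nat) (g : Nat) (hg : g ≤ n - 1)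
    (h : ∀ k, k < n → blk k = blk' k) : incLand blk n g = incLand blk' n g := by
  induction g with
  | zero => rfl
  | succ g ih =>
    simp only [incLand, h (n - 1 - g) (by omega)]
    rw [ih (by omega)]

theorem sweepFwd_eq (bl : List Bool) :
    sweepFwd bl = (List.range bl.length).map (fun j => decLand (fun k => bl.getD k false) j) := by
  suffices h : ∀ t : Nat, t ≤ bl.length →
      (PySem.List.pyRange 0 (t : Int) 1).foldl
        (fun (s : List Int × Int) j =>
          (s.1 ++ [s.2], if PySem.List.pyGetD bl j false = true then j + 1 else s.2))
        ([], 0)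
      = ((List.range t).map (fun j => decLand (fun k => bl.getD k false) j),
         decLand (fun k => bl.getD k false) t) by
    unfold sweepFwd
    rw [h bl.length le_rfl]
  intro t ht
  induction t with
  | zero => simp [PySem.List.pyRange_one_eq_nil, decLand]
  | succ t ih =>
    rw [show (((t + 1 : Nat) : Int)) = (t : Int) + 1 by push_cast; ring,
        PySem.List.pyRange_one_succ_right (by omega), List.foldl_append, ih (by omega)]
    simp only [List.foldl_cons, List.foldl_nil, List.range_succ, List.map_append, List.map_cons,
      List.map_nil, PySem.List.pyGetD_natCast]
    simp only [decLand]

theorem sweepBwd_eq (bl : List Bool) :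
    sweepBwd bl =
      ((List.range bl.length).map
        (fun g => incLand (fun k => bl.getD k false) bl.length g)).reverse := by
  suffices h : ∀ d k : Nat, k + d = bl.length →
      (PySem.List.pyRange ((bl.length : Int) - 1 - k) (-1) (-1)).foldl
        (fun (s : List Int × Int) j =>
          (s.1 ++ [s.2], if PySem.List.pyGetD bl j false = true then j - 1 else s.2))
        ((List.range k).map (fun g => incLand (fun q => bl.getD q false) bl.length g),
         incLand (fun q => bl.getD q false) bl.length k)
      = ((List.range bl.length).map (fun g => incLand (fun q => bl.getD q false) bl.length g),
         incLand (fun q => bl.getD q false) bl.length bl.length) by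
    unfold sweepBwd
    have h0 := h bl.length 0 (by omega)
    simp only [List.range_zero, List.map_nil, incLand, Nat.cast_zero, sub_zero] at h0
    rw [h0]
  intro d
  induction d with
  | zero =>
    intro k hk
    have hk' : k = bl.length := by omega
    subst hk'
    rw [PySem.List.pyRange_neg_one_eq_nil (by omega), List.foldl_nil]
  | succ d ih =>
    intro k hk
    have hklt : k < bl.length := by omega
    rw [PySem.List.pyRange_neg_one_cons (by omega), List.foldl_cons]
    have hcast : ((bl.length : Int) - 1 - (k : Nat)) = ((bl.length - 1 - k : Nat) : Int) := by
      push_cast; omega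
    have hstep :
        ((List.range k).map (fun g => incLand (fun q => bl.getD q false) bl.length g) ++
          [incLand (fun q => bl.getD q false) bl.length k],
         if PySem.List.pyGetD bl ((bl.length : Int) - 1 - (k : Nat)) false = true
         then (bl.length : Int) - 1 - (k : Nat) - 1
         else incLand (fun q => bl.getD q false) bl.length k)
        = ((List.range (k + 1)).map (fun g => incLand (fun q => bl.getD q false) bl.length g),
           incLand (fun q => bl.getD q false) bl.length (k + 1)) := by
      rw [List.range_succ, List.map_append, List.map_cons, List.map_nil]
      refine congrArg _ ?_
      rw [hcast, PySem.List.pyGetD_natCast]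
      simp only [incLand]
      rw [show ((bl.length - 1 - k : Nat) : Int) - 1 = (bl.length : Int) - 2 - (k : Nat) by
        push_cast; omega]
    rw [hstep, show ((bl.length : Int) - 1 - (k : Nat) - 1)
          = ((bl.length : Int) - 1 - ((k + 1 : Nat) : Int)) by push_cast; ring]
    exact ih (k + 1) (by omega)

theorem slideUp_eq (board : List String) (n m : Nat) (c : Int) (hc0 : 0 ≤ c) (hcm : c < (m : Int)) :
    ∀ (p fuel : Nat), p < fuel → ∀ (i r : Int), 1 ≤ i → r - i + 1 = (p : Int) → r < (n : Int) →
      slideLoopA board (n : Int) (m : Int) r c (-1) 0 i fuel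
        = (decLand (fun k => decide (pvCell board (k : Int) c = 'D')) p, c) := by
  intro p
  induction p with
  | zero =>
    intro fuel hf i r hi hp hr
    match fuel, hf with
    | fuel + 1, _ =>
      simp only [slideLoopA]
      rw [if_pos (Or.inl (by omega))]
      simp only [decLand, Prod.mk.injEq]
      constructor <;> first | omega | trivial
  | succ p ih =>
    intro fuel hf i r hi hp hr
    match fuel, hf with
    | fuel + 1, hf =>
      simp only [slideLoopA]
      rw [show c + 0 * i = c from by ring, show c + 0 * (i - 1) = c from by ring]
      have htr : r + -1 * i = ((p : Nat) : Int) := by omega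
      by_cases hD : pvCell board ((p : Nat) : Int) c = 'D'
      · rw [if_pos (by rw [htr]; exact Or.inr (Or.inr (Or.inr (Or.inr hD))))]
        simp only [decLand, hD, decide_true, if_true, Prod.mk.injEq]
        constructor <;> first | omega | trivial
      · rw [if_neg (by rw [htr]; push_neg; refine ⟨by omega, by omega, by omega, by omega, hD⟩)]
        rw [ih fuel (by omega) (i + 1) r (by omega) (by omega) hr]
        simp [incLand, decLand, hD]

theorem slideDown_eq (board : List String) (n m : Nat) (c : Int) (hc0 : 0 ≤ c) (hcm : c < (m : Int)) :
    ∀ (g fuel : Nat), g < fuel → ∀ (i r : Int), 1 ≤ i → (n : Int) - (r + i) = (g : Int) → 0 ≤ r →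
      slideLoopA board (n : Int) (m : Int) r c 1 0 i fuel
        = (incLand (fun k => decide (pvCell board (k : Int) c = 'D')) n g, c) := by
  intro g
  induction g with
  | zero =>
    intro fuel hf i r hi hg hr
    match fuel, hf with
    | fuel + 1, _ =>
      simp only [slideLoopA]
      rw [if_pos (Or.inr (Or.inl (by omega)))]
      simp only [incLand, Prod.mk.injEq]
      constructor <;> first | omega | trivial
  | succ g ih =>
    intro fuel hf i r hi hg hr
    match fuel, hf with
    | fuel + 1, hf =>
      simp only [slideLoopA]
      rw [show c + 0 * i = c from by ring, show c + 0 * (i - 1) = c from by ring]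
      have htr : r + 1 * i = ((n - 1 - g : Nat) : Int) := by omega
      have hgn : g + 2 ≤ n := by omega
      by_cases hD : pvCell board ((n - 1 - g : Nat) : Int) c = 'D'
      · rw [if_pos (by rw [htr]; exact Or.inr (Or.inr (Or.inr (Or.inr hD))))]
        simp only [incLand, hD, decide_true, if_true, Prod.mk.injEq]
        constructor <;> first | omega | trivial
      · rw [if_neg (by rw [htr]; push_neg; refine ⟨by omega, by omega, by omega, by omega, hD⟩)]
        rw [ih fuel (by omega) (i + 1) r (by omega) (by omega) hr]
        simp [incLand, decLand, hD]

theorem slideLeft_eq (board : List String) (n m : Nat) (r : Int) (hr0 : 0 ≤ r) (hrn : r < (n : Int)) :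
    ∀ (p fuel : Nat), p < fuel → ∀ (i c : Int), 1 ≤ i → c - i + 1 = (p : Int) → c < (m : Int) →
      slideLoopA board (n : Int) (m : Int) r c 0 (-1) i fuel
        = (r, decLand (fun k => decide (pvCell board r (k : Int) = 'D')) p) := by
  intro p
  induction p with
  | zero =>
    intro fuel hf i c hi hp hc
    match fuel, hf with
    | fuel + 1, _ =>
      simp only [slideLoopA]
      rw [if_pos (Or.inr (Or.inr (Or.inl (by omega))))]
      simp only [decLand, Prod.mk.injEq]
      constructor <;> first | omega | trivial
  | succ p ih =>
    intro fuel hf i c hi hp hc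
    match fuel, hf with
    | fuel + 1, hf =>
      simp only [slideLoopA]
      rw [show r + 0 * i = r from by ring, show r + 0 * (i - 1) = r from by ring]
      have htc : c + -1 * i = ((p : Nat) : Int) := by omega
      by_cases hD : pvCell board r ((p : Nat) : Int) = 'D'
      · rw [if_pos (by rw [htc]; exact Or.inr (Or.inr (Or.inr (Or.inr hD))))]
        simp only [decLand, hD, decide_true, if_true, Prod.mk.injEq]
        constructor <;> first | omega | trivial
      · rw [if_neg (by rw [htc]; push_neg; refine ⟨by omega, by omega, by omega, by omega, hD⟩)]
        rw [ih fuel (by omega) (i + 1) c (by omega) (by omega) hc]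
        simp [incLand, decLand, hD]

theorem slideRight_eq (board : List String) (n m : Nat) (r : Int) (hr0 : 0 ≤ r) (hrn : r < (n : Int)) :
    ∀ (g fuel : Nat), g < fuel → ∀ (i c : Int), 1 ≤ i → (m : Int) - (c + i) = (g : Int) → 0 ≤ c →
      slideLoopA board (n : Int) (m : Int) r c 0 1 i fuel
        = (r, incLand (fun k => decide (pvCell board r (k : Int) = 'D')) m g) := by
  intro g
  induction g with
  | zero =>
    intro fuel hf i c hi hg hc
    match fuel, hf with
    | fuel + 1, _ =>
      simp only [slideLoopA]
      rw [if_pos (Or.inr (Or.inr (Or.inr (Or.inl (by omega)))))]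
      simp only [incLand, Prod.mk.injEq]
      constructor <;> first | omega | trivial
  | succ g ih =>
    intro fuel hf i c hi hg hc
    match fuel, hf with
    | fuel + 1, hf =>
      simp only [slideLoopA]
      rw [show r + 0 * i = r from by ring, show r + 0 * (i - 1) = r from by ring]
      have htc : c + 1 * i = ((m - 1 - g : Nat) : Int) := by omega
      have hgm : g + 2 ≤ m := by omega
      by_cases hD : pvCell board r ((m - 1 - g : Nat) : Int) = 'D'
      · rw [if_pos (by rw [htc]; exact Or.inr (Or.inr (Or.inr (Or.inr hD))))]
        simp only [incLand, hD, decide_true, if_true, Prod.mk.injEq]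
        constructor <;> first | omega | trivial
      · rw [if_neg (by rw [htc]; push_neg; refine ⟨by omega, by omega, by omega, by omega, hD⟩)]
        rw [ih fuel (by omega) (i + 1) c (by omega) (by omega) hc]
        simp [incLand, decLand, hD]

theorem length_map_pyRange {α : Type} (f : Int → α) (n : Nat) :
    ((PySem.List.pyRange 0 (n : Int) 1).map f).length = n := by
  simp [PySem.List.length_pyRange_one]

theorem getD_map_pyRange_nat {α : Type} (f : Int → α) (n k : Nat) (d : α) (hk : k < n) :
    ((PySem.List.pyRange 0 (n : Int) 1).map f).getD k d = f (k : Int) := by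
  rw [List.getD_eq_getElem?_getD, PySem.List.getElem?_map_pyRange_zero f n k hk, Option.getD_some]

theorem lookUp_eq (board : List String) (n m : Nat) (r c : Int)
    (hr0 : 0 ≤ r) (hrn : r < (n : Int)) (hc0 : 0 ≤ c) (hcm : c < (m : Int)) :
    pvLook ((colsB board (n : Int) (m : Int)).map sweepFwd) c r
      = decLand (fun k => decide (pvCell board (k : Int) c = 'D')) r.toNat := by
  unfold pvLook colsB
  rw [List.map_map, PySem.List.pyGetD_map_pyRange_of_nonneg _ (m : Int) c _ hc0 hcm]
  simp only [Function.comp_apply]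
  rw [sweepFwd_eq, length_map_pyRange, PySem.List.pyGetD_of_nonneg _ _ hr0,
      PySem.List.getD_map_range _ n r.toNat 0 (by omega)]
  exact decLand_congr _ _ _ (fun k hk => by
    rw [getD_map_pyRange_nat _ n k false (by omega)])

theorem lookLeft_eq (board : List String) (n m : Nat) (r c : Int)
    (hr0 : 0 ≤ r) (hrn : r < (n : Int)) (hc0 : 0 ≤ c) (hcm : c < (m : Int)) :
    pvLook ((rowsB board (n : Int) (m : Int)).map sweepFwd) r c
      = decLand (fun k => decide (pvCell board r (k : Int) = 'D')) c.toNat := by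
  unfold pvLook rowsB
  rw [List.map_map, PySem.List.pyGetD_map_pyRange_of_nonneg _ (n : Int) r _ hr0 hrn]
  simp only [Function.comp_apply]
  rw [sweepFwd_eq, length_map_pyRange, PySem.List.pyGetD_of_nonneg _ _ hc0,
      PySem.List.getD_map_range _ m c.toNat 0 (by omega)]
  exact decLand_congr _ _ _ (fun k hk => by
    rw [getD_map_pyRange_nat _ m k false (by omega)])

theorem lookDown_eq (board : List String) (n m : Nat) (r c : Int)
    (hr0 : 0 ≤ r) (hrn : r < (n : Int)) (hc0 : 0 ≤ c) (hcm : c < (m : Int)) :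
    pvLook ((colsB board (n : Int) (m : Int)).map sweepBwd) c r
      = incLand (fun k => decide (pvCell board (k : Int) c = 'D')) n (n - 1 - r.toNat) := by
  unfold pvLook colsB
  rw [List.map_map, PySem.List.pyGetD_map_pyRange_of_nonneg _ (m : Int) c _ hc0 hcm]
  simp only [Function.comp_apply]
  rw [sweepBwd_eq, length_map_pyRange, PySem.List.pyGetD_of_nonneg _ _ hr0,
      List.getD_eq_getElem _ _ (by simp; omega), List.getElem_reverse]
  simp only [List.length_map, List.length_range]
  rw [List.getElem_map, List.getElem_range]
  exact incLand_congr _ _ _ _ (by omega) (fun k hk => by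
    rw [getD_map_pyRange_nat _ n k false (by omega)])

theorem lookRight_eq (board : List String) (n m : Nat) (r c : Int)
    (hr0 : 0 ≤ r) (hrn : r < (n : Int)) (hc0 : 0 ≤ c) (hcm : c < (m : Int)) :
    pvLook ((rowsB board (n : Int) (m : Int)).map sweepBwd) r c
      = incLand (fun k => decide (pvCell board r (k : Int) = 'D')) m (m - 1 - c.toNat) := by
  unfold pvLook rowsB
  rw [List.map_map, PySem.List.pyGetD_map_pyRange_of_nonneg _ (n : Int) r _ hr0 hrn]
  simp only [Function.comp_apply]
  rw [sweepBwd_eq, length_map_pyRange, PySem.List.pyGetD_of_nonneg _ _ hc0,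
      List.getD_eq_getElem _ _ (by simp; omega), List.getElem_reverse]
  simp only [List.length_map, List.length_range]
  rw [List.getElem_map, List.getElem_range]
  exact incLand_congr _ _ _ _ (by omega) (fun k hk => by
    rw [getD_map_pyRange_nat _ m k false (by omega)])

theorem pvUpd_q_mem (mov : Int) (s : List (List Bool) × List (Int × Int × Int)) (x : Int × Int) :
    ∀ e ∈ (pvUpd mov s x).2, e ∈ s.2 ∨ e = (x.1, x.2, mov + 1) := by
  intro e he
  unfold pvUpd at he
  split_ifs at he
  · exact Or.inl he
  · rcases List.mem_append.mp he with h | h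
    · exact Or.inl h
    · right; simpa using h

theorem scanInner_bounds (board : List String) (R C : Int) (r : Int)
    (P : Int × Int × Int × Int → Prop)
    (hP : P = fun s => 0 ≤ s.1 ∧ s.1 < R ∧ 0 ≤ s.2.1 ∧ s.2.1 < C ∧
      0 ≤ s.2.2.1 ∧ s.2.2.1 < R ∧ 0 ≤ s.2.2.2 ∧ s.2.2.2 < C)
    (hr : 0 ≤ r ∧ r < R) :
    ∀ (l : List Int), (∀ x ∈ l, 0 ≤ x ∧ x < C) → ∀ s, P s →
      P (l.foldl (fun (s : Int × Int × Int × Int) c =>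
        let s1 : Int × Int × Int × Int :=
          if pvCell board r c = 'R' then (r, c, s.2.2.1, s.2.2.2) else s
        if pvCell board r c = 'G' then (s1.1, s1.2.1, r, c) else s1) s) := by
  intro l
  induction l with
  | nil => intro _ s hs; exact hs
  | cons x l ihl =>
    intro hl s hs
    rw [List.foldl_cons]
    refine ihl (fun y hy => hl y (List.mem_cons_of_mem _ hy)) _ ?_
    have hx := hl x List.mem_cons_self
    subst hP
    dsimp only
    split_ifs <;> (try dsimp only) <;> tauto

theorem scan_bounds (board : List String) (R C : Int) (hR : 0 < R) (hC : 0 < C) :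
    0 ≤ (scanRG board R C).1 ∧ (scanRG board R C).1 < R ∧
    0 ≤ (scanRG board R C).2.1 ∧ (scanRG board R C).2.1 < C ∧
    0 ≤ (scanRG board R C).2.2.1 ∧ (scanRG board R C).2.2.1 < R ∧
    0 ≤ (scanRG board R C).2.2.2 ∧ (scanRG board R C).2.2.2 < C := by
  unfold scanRG
  suffices h : ∀ (l : List Int), (∀ x ∈ l, 0 ≤ x ∧ x < R) →
      ∀ s, (0 ≤ s.1 ∧ s.1 < R ∧ 0 ≤ s.2.1 ∧ s.2.1 < C ∧
        0 ≤ s.2.2.1 ∧ s.2.2.1 < R ∧ 0 ≤ s.2.2.2 ∧ s.2.2.2 < C) →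
      (fun s : Int × Int × Int × Int => 0 ≤ s.1 ∧ s.1 < R ∧ 0 ≤ s.2.1 ∧ s.2.1 < C ∧
        0 ≤ s.2.2.1 ∧ s.2.2.1 < R ∧ 0 ≤ s.2.2.2 ∧ s.2.2.2 < C)
      (l.foldl (fun s r =>
        (PySem.List.pyRange 0 C 1).foldl (fun (s : Int × Int × Int × Int) c =>
          let s1 : Int × Int × Int × Int :=
            if pvCell board r c = 'R' then (r, c, s.2.2.1, s.2.2.2) else s
          if pvCell board r c = 'G' then (s1.1, s1.2.1, r, c) else s1) s) s) by
    exact h (PySem.List.pyRange 0 R 1)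
      (fun x hx => by rw [PySem.List.mem_pyRange_one] at hx; exact hx)
      (0, 0, 0, 0) ⟨le_refl 0, hR, le_refl 0, hC, le_refl 0, hR, le_refl 0, hC⟩
  intro l
  induction l with
  | nil => intro _ s hs; exact hs
  | cons x l ihl =>
    intro hl s hs
    rw [List.foldl_cons]
    refine ihl (fun y hy => hl y (List.mem_cons_of_mem _ hy)) _ ?_
    exact scanInner_bounds board R C x _ rfl (hl x List.mem_cons_self)
      (PySem.List.pyRange 0 C 1)
      (fun y hy => by rw [PySem.List.mem_pyRange_one] at hy; exact hy) s hs

theorem bfs_eq (board : List String) (n m : Nat) (er ec : Int) :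
    ∀ (fuel : Nat) (q : List (Int × Int × Int)) (v : List (List Bool)),
      (∀ e ∈ q, 0 ≤ e.1 ∧ e.1 < (n : Int) ∧ 0 ≤ e.2.1 ∧ e.2.1 < (m : Int)) →
      bfsA board (n : Int) (m : Int) er ec fuel q v
        = bfsB ((colsB board (n : Int) (m : Int)).map sweepFwd)
               ((colsB board (n : Int) (m : Int)).map sweepBwd)
               ((rowsB board (n : Int) (m : Int)).map sweepFwd)
               ((rowsB board (n : Int) (m : Int)).map sweepBwd) er ec fuel q v := by
  intro fuel
  induction fuel with
  | zero => intro q v _; rfl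
  | succ fuel ih =>
    intro q v hq
    match q with
    | [] => rfl
    | (r, c, mov) :: q =>
      have hhead := hq (r, c, mov) List.mem_cons_self
      dsimp only at hhead
      obtain ⟨hr0, hrn, hc0, hcm⟩ := hhead
      have hq' := fun e he => hq e (List.mem_cons_of_mem _ he)
      have hnm : (((n : Int) + (m : Int)).toNat + 2) = (n + m + 2 : Nat) := by omega
      have hup : slideLoopA board (n : Int) (m : Int) r c (-1) 0 1 (((n : Int) + (m : Int)).toNat + 2)
          = (decLand (fun k => decide (pvCell board (k : Int) c = 'D')) r.toNat, c) := by
        rw [hnm]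
        exact slideUp_eq board n m c hc0 hcm r.toNat (n + m + 2) (by omega) 1 r (by omega)
          (by omega) (by omega)
      have hleft : slideLoopA board (n : Int) (m : Int) r c 0 (-1) 1 (((n : Int) + (m : Int)).toNat + 2)
          = (r, decLand (fun k => decide (pvCell board r (k : Int) = 'D')) c.toNat) := by
        rw [hnm]
        exact slideLeft_eq board n m r hr0 hrn c.toNat (n + m + 2) (by omega) 1 c (by omega)
          (by omega) (by omega)
      have hdown : slideLoopA board (n : Int) (m : Int) r c 1 0 1 (((n : Int) + (m : Int)).toNat + 2)
          = (incLand (fun k => decide (pvCell board (k : Int) c = 'D')) n (n - 1 - r.toNat), c) := by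
        rw [hnm]
        exact slideDown_eq board n m c hc0 hcm (n - 1 - r.toNat) (n + m + 2) (by omega) 1 r
          (by omega) (by omega) (by omega)
      have hright : slideLoopA board (n : Int) (m : Int) r c 0 1 1 (((n : Int) + (m : Int)).toNat + 2)
          = (r, incLand (fun k => decide (pvCell board r (k : Int) = 'D')) m (m - 1 - c.toNat)) := by
        rw [hnm]
        exact slideRight_eq board n m r hr0 hrn (m - 1 - c.toNat) (n + m + 2) (by omega) 1 c
          (by omega) (by omega) (by omega)
      simp only [bfsA, bfsB, List.foldl_cons, List.foldl_nil]
      rw [hup, hleft, hdown, hright,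
          lookUp_eq board n m r c hr0 hrn hc0 hcm,
          lookLeft_eq board n m r c hr0 hrn hc0 hcm,
          lookDown_eq board n m r c hr0 hrn hc0 hcm,
          lookRight_eq board n m r c hr0 hrn hc0 hcm]
      split_ifs with hend
      · rfl
      · apply ih
        intro e he
        have hn0 : 0 < n := by omega
        have hm0 : 0 < m := by omega
        have b1 := decLand_bounds (fun k => decide (pvCell board (k : Int) c = 'D')) r.toNat
        have b2 := decLand_bounds (fun k => decide (pvCell board r (k : Int) = 'D')) c.toNat
        have b3 := incLand_bounds (fun k => decide (pvCell board (k : Int) c = 'D')) n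
          (n - 1 - r.toNat) (by omega) hn0
        have b4 := incLand_bounds (fun k => decide (pvCell board r (k : Int) = 'D')) m
          (m - 1 - c.toNat) (by omega) hm0
        rcases pvUpd_q_mem _ _ _ e he with he | he
        · rcases pvUpd_q_mem _ _ _ e he with he | he
          · rcases pvUpd_q_mem _ _ _ e he with he | he
            · rcases pvUpd_q_mem _ _ _ e he with he | he
              · exact hq' e he
              · subst he; exact ⟨by simpa using b1.1, by simpa using (by omega : decLand (fun k => decide (pvCell board (k : Int) c = 'D')) r.toNat < (n:Int)), hc0, hcm⟩
            · subst he; exact ⟨hr0, hrn, by simpa using b2.1, by simpa using (by omega : decLand (fun k => decide (pvCell board r (k : Int) = 'D')) c.toNat < (m:Int))⟩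
          · subst he; exact ⟨by simpa using b3.1, by simpa using (by omega : incLand (fun k => decide (pvCell board (k : Int) c = 'D')) n (n - 1 - r.toNat) < (n:Int)), hc0, hcm⟩
        · subst he; exact ⟨hr0, hrn, by simpa using b4.1, by simpa using (by omega : incLand (fun k => decide (pvCell board r (k : Int) = 'D')) m (m - 1 - c.toNat) < (m:Int))⟩

theorem solution_spec' : ∀ (board : List String), Pre_solution board →
    solution board = solution_alt board := by
  intro board hpre
  obtain ⟨hne, hhead, _⟩ := hpre
  unfold solution solution_alt
  match board, hne with
  | b :: rest, _ =>
    dsimp only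
    have hhead' : 0 < (PySem.List.pyGetD (b :: rest) 0 "").toList.length := by
      rw [PySem.List.pyGetD_zero_cons]; simpa using hhead
    have hb := scan_bounds (b :: rest) ((b :: rest).length : Int)
      ((PySem.List.pyGetD (b :: rest) 0 "").toList.length : Int)
      (by simp) (by exact_mod_cast hhead')
    apply bfs_eq (b :: rest) (b :: rest).length (PySem.List.pyGetD (b :: rest) 0 "").toList.length
    intro e he
    rw [List.mem_singleton] at he
    subst he
    dsimp only
    exact ⟨hb.1, hb.2.1, hb.2.2.1, hb.2.2.2.1⟩

-- ===== VERDICT (by name: the statement is the Claim_ definition above) =====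
theorem solution_spec : Claim_equal_solution := by
  intro board _ hpre
  unfold Spec_solution
  exact solution_spec' board hpre
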